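-- pv_equiv track=rewrite | github.com/Lets-dancing/algorithms | sprint_13/P_triangle.py | p_triangle
-- ===== SOURCE A (Python) =====
-- def p_triangle(nums):
--     nums.sort(reverse=True)
--     for i in range(len(nums)):
--         first = nums[i]
--         for j in range(i + 1, len(nums) - 1):
--             second = nums[j]
--             for k in range(j + 1, len(nums)):
--                 two_sum = second + nums[k]
--                 if two_sum > first:
--                     return two_sum + first
-- ===== SOURCE B (Python) =====
-- def p_triangle(nums):
--     s = sorted(nums, reverse=True)
--     for a, b, c in zip(s, s[1:], s[2:]):
--         if b + c > a:
--             return a + b + c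
--     return None
-- ===== Notes on version B (the rewrite author's own statement) =====
-- stated objective: alternative
-- what changed: Replaced the triple nested index loop over all (i,j,k) with a single zip scan of consecutive triples of the descending-sorted list (the first valid pair for any i is necessarily (i+1,i+2)), without mutating the argument.
import Mathlib
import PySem

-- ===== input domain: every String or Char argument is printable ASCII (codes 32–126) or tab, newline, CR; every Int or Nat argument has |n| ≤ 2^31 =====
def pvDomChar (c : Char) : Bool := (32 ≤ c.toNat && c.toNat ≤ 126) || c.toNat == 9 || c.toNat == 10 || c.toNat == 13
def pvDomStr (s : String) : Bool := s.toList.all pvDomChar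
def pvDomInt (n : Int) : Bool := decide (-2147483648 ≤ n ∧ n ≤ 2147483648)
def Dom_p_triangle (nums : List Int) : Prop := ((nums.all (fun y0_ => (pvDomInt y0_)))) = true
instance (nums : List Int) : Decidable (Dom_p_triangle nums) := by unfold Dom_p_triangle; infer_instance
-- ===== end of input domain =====

-- B replaces A's triple nested index loop by a single scan of consecutive triples of the
-- descending-sorted list. A sorts its argument in place (a caller-visible mutation); B does not —
-- the equivalence proved here is about the RETURN value only.

-- ===== PORT A =====
-- inner 'for k in range(j+1, len(nums))' with early return
def pvLoopK (s : List Int) (first second : Int) : List Int → Option Int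
  | [] => none
  | k :: ks =>
    match PySem.List.pyGet? s k with
    | none => none
    | some v =>
      let two_sum := second + v
      if two_sum > first then some (two_sum + first) else pvLoopK s first second ks

-- middle 'for j in range(i+1, len(nums)-1)'
def pvLoopJ (s : List Int) (first : Int) : List Int → Option Int
  | [] => none
  | j :: js =>
    match PySem.List.pyGet? s j with
    | none => none
    | some second =>
      match pvLoopK s first second (PySem.List.pyRange (j + 1) (s.length : Int) 1) with
      | some r => some r
      | none => pvLoopJ s first js

-- outer 'for i in range(len(nums))'
def pvLoopI (s : List Int) : List Int → Option Int
  | [] => none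
  | i :: is =>
    match PySem.List.pyGet? s i with
    | none => none
    | some first =>
      match pvLoopJ s first (PySem.List.pyRange (i + 1) ((s.length : Int) - 1) 1) with
      | some r => some r
      | none => pvLoopI s is

def p_triangle (nums : List Int) : Option Int :=
  let s := PySem.List.sorted nums (fun x => x) true
  pvLoopI s (PySem.List.pyRange 0 (s.length : Int) 1)

-- ===== PORT B =====
-- 'for a, b, c in zip(s, s[1:], s[2:])' with early return
def pvTriScan : List ((Int × Int) × Int) → Option Int
  | [] => none
  | ((a, b), c) :: rest => if b + c > a then some (a + b + c) else pvTriScan rest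

def p_triangle_alt (nums : List Int) : Option Int :=
  let s := PySem.List.sorted nums (fun x => x) true
  pvTriScan ((s.zip (s.drop 1)).zip (s.drop 2))

-- ===== PRECONDITION & SPEC =====
def Spec_p_triangle (nums : List Int) (out : Option Int) : Prop := out = p_triangle_alt nums
instance (nums : List Int) (out : Option Int) : Decidable (Spec_p_triangle nums out) := by unfold Spec_p_triangle; infer_instance

-- ===== CLAIM (what is proved, stated in full; the proofs are below) =====
def Claim_equal_p_triangle : Prop := ∀ (nums : List Int), Dom_p_triangle nums → Spec_p_triangle nums (p_triangle nums)

-- ===== LEMMAS AND PROOFS =====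

-- proof-side structural form of B's zip scan
def pvScan3 : List Int → Option Int
  | a :: b :: c :: r => if b + c > a then some (a + b + c) else pvScan3 (b :: c :: r)
  | _ => none

lemma pvScan3_short (l : List Int) (h : l.length < 3) : pvScan3 l = none := by
  match l with
  | [] => rfl
  | [_] => rfl
  | [_, _] => rfl
  | _ :: _ :: _ :: _ => simp only [List.length_cons] at h; omega

lemma tri_eq_scan3 : ∀ s : List Int, pvTriScan ((s.zip (s.drop 1)).zip (s.drop 2)) = pvScan3 s
  | [] => rfl
  | [_] => rfl
  | [_, _] => rfl
  | a :: b :: c :: r => by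
    have ih := tri_eq_scan3 (b :: c :: r)
    simp only [List.drop, List.zip_cons_cons] at ih ⊢
    simp only [pvTriScan, pvScan3]
    split <;> simp_all

lemma pairwise_ge_getElem (s : List Int) (hs : s.Pairwise (fun a b => b ≤ a))
    (p q : Nat) (hpq : p ≤ q) (hq : q < s.length) : s[q] ≤ s[p] := by
  rcases Nat.eq_or_lt_of_le hpq with rfl | h
  · exact le_refl _
  · exact List.pairwise_iff_getElem.mp hs p q (lt_of_le_of_lt hpq hq) hq h

lemma pvLoopK_none (s : List Int) (first second : Int) (ks : List Int)
    (h : ∀ k ∈ ks, ∀ v, PySem.List.pyGet? s k = some v → second + v ≤ first) :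
    pvLoopK s first second ks = none := by
  induction ks with
  | nil => rfl
  | cons k ks ih =>
    simp only [pvLoopK]
    cases hg : PySem.List.pyGet? s k with
    | none => rfl
    | some v =>
      dsimp only
      have := h k (by simp) v hg
      rw [if_neg (by omega)]
      exact ih (fun k hk v hv => h k (by simp [hk]) v hv)

lemma pvLoopJ_none (s : List Int) (first : Int) (js : List Int)
    (h : ∀ j ∈ js, ∀ second, PySem.List.pyGet? s j = some second →
      pvLoopK s first second (PySem.List.pyRange (j + 1) (s.length : Int) 1) = none) :
    pvLoopJ s first js = none := by
  induction js with
  | nil => rfl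
  | cons j js ih =>
    simp only [pvLoopJ]
    cases hg : PySem.List.pyGet? s j with
    | none => rfl
    | some second =>
      dsimp only
      rw [h j (by simp) second hg]
      exact ih (fun j hj sec hs => h j (by simp [hj]) sec hs)

-- the heart: on a descending list, A's index loops equal the consecutive-triple scan
lemma pvLoopI_eq (s : List Int) (hs : s.Pairwise (fun a b => b ≤ a)) :
    ∀ (d i : Nat), s.length - i ≤ d →
      pvLoopI s (PySem.List.pyRange (i : Int) (s.length : Int) 1) = pvScan3 (s.drop i) := by
  intro d
  induction d with
  | zero =>
    intro i hd
    have hlen : s.length ≤ i := by omega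
    rw [PySem.List.pyRange_one_eq_nil (by exact_mod_cast hlen)]
    rw [List.drop_eq_nil_of_le hlen]
    rfl
  | succ d ih =>
    intro i hd
    by_cases hi : i < s.length
    case neg =>
      rw [PySem.List.pyRange_one_eq_nil (by exact_mod_cast Nat.le_of_not_lt hi)]
      rw [List.drop_eq_nil_of_le (Nat.le_of_not_lt hi)]
      rfl
    case pos =>
      rw [PySem.List.pyRange_one_cons (by exact_mod_cast hi)]
      simp only [pvLoopI]
      rw [PySem.List.pyGet?_ofNat s i hi]
      dsimp only
      have hcast : (i : Int) + 1 = ((i + 1 : Nat) : Int) := by push_cast; ring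
      by_cases h2 : i + 2 < s.length
      case pos =>
        have h1 : i + 1 < s.length := by omega
        -- the j-loop starts at j = i+1
        rw [show (PySem.List.pyRange ((i : Int) + 1) ((s.length : Int) - 1) 1) =
              ((i : Int) + 1) :: PySem.List.pyRange ((i : Int) + 1 + 1) ((s.length : Int) - 1) 1 from
              PySem.List.pyRange_one_cons (by omega)]
        simp only [pvLoopJ]
        rw [hcast, PySem.List.pyGet?_ofNat s (i+1) h1]
        dsimp only
        -- the k-loop starts at k = i+2
        rw [show (PySem.List.pyRange (((i + 1 : Nat) : Int) + 1) ((s.length : Int)) 1) =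
              (((i + 1 : Nat) : Int) + 1) :: PySem.List.pyRange (((i + 1 : Nat) : Int) + 1 + 1) ((s.length : Int)) 1 from
              PySem.List.pyRange_one_cons (by omega)]
        simp only [pvLoopK]
        rw [show ((i + 1 : Nat) : Int) + 1 = ((i + 2 : Nat) : Int) by push_cast; ring,
          PySem.List.pyGet?_ofNat s (i+2) h2]
        dsimp only
        -- unfold the triple at position i on the scan side
        rw [List.drop_eq_getElem_cons hi, List.drop_eq_getElem_cons h1, List.drop_eq_getElem_cons h2]
        by_cases hcond : s[i + 1] + s[i + 2] > s[i]
        case pos =>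
          simp only [pvScan3, if_pos hcond, Option.some.injEq]
          ring
        case neg =>
          rw [if_neg hcond]
          -- rest of the k-loop finds nothing
          have hKnone : pvLoopK s s[i] s[i+1]
              (PySem.List.pyRange (((i + 2 : Nat) : Int) + 1) ((s.length : Int)) 1) = none := by
            apply pvLoopK_none
            intro k hk v hv
            rw [PySem.List.mem_pyRange_one] at hk
            have hk0 : 0 ≤ k := by omega
            have hkn : i + 3 ≤ k.toNat := by omega
            have hklt : k.toNat < s.length := by omega
            rw [PySem.List.pyGet?_of_nonneg s hk0, List.getElem?_eq_getElem hklt] at hv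
            have hv' : v = s[k.toNat] := (Option.some.inj hv).symm
            subst hv'
            have := pairwise_ge_getElem s hs (i + 2) k.toNat (by omega) hklt
            omega
          rw [hKnone]
          -- rest of the j-loop finds nothing
          have hJnone : pvLoopJ s s[i]
              (PySem.List.pyRange ((i + 2 : Nat) : Int) ((s.length : Int) - 1) 1) = none := by
            apply pvLoopJ_none
            intro j hj second hsec
            rw [PySem.List.mem_pyRange_one] at hj
            have hj0 : 0 ≤ j := by omega
            have hjn : i + 2 ≤ j.toNat := by omega
            have hjlt : j.toNat < s.length := by omega
            rw [PySem.List.pyGet?_of_nonneg s hj0, List.getElem?_eq_getElem hjlt] at hsec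
            have hsec' : second = s[j.toNat] := (Option.some.inj hsec).symm
            subst hsec'
            apply pvLoopK_none
            intro k hk v hv
            rw [PySem.List.mem_pyRange_one] at hk
            have hk0 : 0 ≤ k := by omega
            have hkn : j.toNat + 1 ≤ k.toNat := by omega
            have hklt : k.toNat < s.length := by omega
            rw [PySem.List.pyGet?_of_nonneg s hk0, List.getElem?_eq_getElem hklt] at hv
            have hv' : v = s[k.toNat] := (Option.some.inj hv).symm
            subst hv'
            have hJle := pairwise_ge_getElem s hs (i + 1) j.toNat (by omega) hjlt
            have hKle := pairwise_ge_getElem s hs (i + 2) k.toNat (by omega) hklt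
            omega
          dsimp only
          rw [hJnone]
          dsimp only
          rw [ih (i + 1) (by omega)]
          rw [List.drop_eq_getElem_cons h1, List.drop_eq_getElem_cons h2]
          simp only [pvScan3, if_neg hcond]
      case neg =>
        -- fewer than three elements from i on: the j-loop range is empty
        rw [PySem.List.pyRange_one_eq_nil (by omega)]
        simp only [pvLoopJ]
        rw [hcast, ih (i + 1) (by omega)]
        rw [pvScan3_short _ (by simp; omega), pvScan3_short _ (by simp; omega)]

-- ===== VERDICT (by name: the statement is the Claim_ definition above) =====
theorem p_triangle_spec : Claim_equal_p_triangle := by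
  intro nums _
  unfold Spec_p_triangle p_triangle p_triangle_alt
  set s := PySem.List.sorted nums (fun x => x) true with hsdef
  have hs : s.Pairwise (fun a b => b ≤ a) := PySem.List.sorted_pairwise_rev nums (fun x => x)
  rw [tri_eq_scan3]
  have := pvLoopI_eq s hs s.length 0 (by omega)
  simpa using this
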